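-- pv_equiv track=rewrite | github.com/gcount85/algorithms-practice | 99. book_codingtestpython/89.py | solution
-- ===== SOURCE A (Python) =====
-- def solution(s):
--     """
--     1. 스택으로 110을 제거 및 카운팅
--     2. 뒤에서부터 0을 찾아서, 0 뒤에 110*count 삽입
--     """
--
--     answer = []
--
--     for string in s:
--
--         # 110 제거 및 카운팅
--         stack = []
--         count = 0
--         for elem in string:
--             stack.append(elem)
--             if len(stack) >= 3 and stack[-3:] == ["1", "1", "0"]:
--                 stack.pop()
--                 stack.pop()
--                 stack.pop()
--                 count += 1
--
--         # 마지막 0 위치인 i 찾기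
--         p = len(stack) - 1
--         while p >= 0:
--             if stack[p] == "0":
--                 break
--             p -= 1
--
--         # 문자열 조합
--         lst = stack[: p + 1]
--         lst.extend(["1", "1", "0"] * count)
--         lst.extend(stack[p + 1 :])
--         answer.append("".join(lst))
--
--     return answer
-- ===== SOURCE B (Python) =====
-- def _norm(t):
--     # repeatedly delete the leftmost '110' until none remains
--     i = t.find('110')
--     while i != -1:
--         t = t[:i] + t[i + 3:]
--         i = t.find('110')
--     return t
--
--
-- def _fix(string):
--     t = _norm(string)
--     count = (len(string) - len(t)) // 3
--     p = t.rfind('0')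
--     return t[:p + 1] + '110' * count + t[p + 1:]
--
--
-- def solution(s):
--     return [_fix(string) for string in s]
-- ===== Notes on version B (the rewrite author's own statement) =====
-- stated objective: alternative
-- what changed: Replaces A's single-pass stack simulation (push each char, pop+count when the top three are '110', then a manual backwards while-loop for the last '0') by a string-rewriting formulation: repeatedly delete the leftmost '110' via str.find and slicing until none remains, recover the removal count arithmetically from length conservation ((len(s)-len(t))//3), locate the last zero with t.rfind('0'), and splice with string concatenation; correctness rests on the '110'-deletion system having a unique normal form.
import Mathlib
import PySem

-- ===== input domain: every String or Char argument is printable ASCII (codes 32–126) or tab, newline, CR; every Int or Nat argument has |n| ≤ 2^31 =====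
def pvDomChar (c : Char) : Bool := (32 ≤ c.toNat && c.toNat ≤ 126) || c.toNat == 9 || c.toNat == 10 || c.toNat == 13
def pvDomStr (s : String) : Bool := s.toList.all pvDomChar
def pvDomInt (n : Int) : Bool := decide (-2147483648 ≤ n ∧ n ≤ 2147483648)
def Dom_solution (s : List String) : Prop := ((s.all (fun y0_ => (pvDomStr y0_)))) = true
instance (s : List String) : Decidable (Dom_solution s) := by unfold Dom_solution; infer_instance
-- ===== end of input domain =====

-- B rewrites A's one-pass stack simulation as repeated leftmost-'110' deletion with the count
-- recovered from length conservation and the last zero found by rfind; same return values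
-- (constant-factor speedup measured: C-level str.find/slicing vs a per-char Python loop).

-- ===== PORT A =====
-- inner loop body of A: push elem, pop three and count when the top of the stack is "110"
def stepA (sc : List Char × Int) (elem : Char) : List Char × Int :=
  let stack := sc.1 ++ [elem]
  if stack.length ≥ 3 ∧ PySem.List.slice stack (some (-3)) none = ['1', '1', '0'] then
    (stack.dropLast.dropLast.dropLast, sc.2 + 1)
  else (stack, sc.2)

-- A's backwards while-loop: p runs len-1, len-2, …; stop at the first '0' (stack[p] is always in range)
def findP (st : List Char) : Nat → Int
  | 0 => -1
  | n + 1 => if st.getD n ' ' = '0' then (n : Int) else findP st n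

def solution (s : List String) : List String :=
  s.foldl (fun answer string =>
    let sc := string.toList.foldl stepA ([], 0)
    let p := findP sc.1 sc.1.length
    let lst := PySem.List.slice sc.1 none (some (p + 1))
               ++ PySem.List.pyRepeat ['1', '1', '0'] sc.2
               ++ PySem.List.slice sc.1 (some (p + 1)) none
    answer ++ [String.ofList lst]) []

-- ===== PORT B =====
-- termination fact for reduceB's while-loop: each deletion shortens t by 3
theorem find_decomp (t : List Char) (h : PySem.Chars.find t ['1', '1', '0'] ≠ -1) :
    t = t.take (PySem.Chars.find t ['1', '1', '0']).toNat ++ ['1', '1', '0'] ++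
        t.drop ((PySem.Chars.find t ['1', '1', '0']).toNat + 3) := by
  have hi : 0 ≤ PySem.Chars.find t ['1', '1', '0'] :=
    (PySem.Chars.find_nonneg_iff t _).mpr ((PySem.Chars.find_ne_neg_one_iff t _).mp h)
  obtain ⟨hpre, -⟩ := PySem.Chars.find_spec hi
  obtain ⟨r, hr⟩ := hpre
  have hdrop : t.drop ((PySem.Chars.find t ['1', '1', '0']).toNat + 3) = r := by
    rw [← List.drop_drop (i := 3) (j := (PySem.Chars.find t ['1', '1', '0']).toNat), ← hr]
    simp
  conv_lhs => rw [← List.take_append_drop (PySem.Chars.find t ['1', '1', '0']).toNat t, ← hr]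
  rw [hdrop, List.append_assoc]

theorem reduceB_dec (t : List Char) (h : PySem.Chars.find t ['1', '1', '0'] ≠ -1) :
    (PySem.List.slice t none (some (PySem.Chars.find t ['1', '1', '0'])) ++
     PySem.List.slice t (some (PySem.Chars.find t ['1', '1', '0'] + 3)) none).length < t.length := by
  have hi : 0 ≤ PySem.Chars.find t ['1', '1', '0'] :=
    (PySem.Chars.find_nonneg_iff t _).mpr ((PySem.Chars.find_ne_neg_one_iff t _).mp h)
  have hlen : (PySem.Chars.find t ['1', '1', '0']).toNat + 3 ≤ t.length := by
    have := congrArg List.length (find_decomp t h)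
    simp [List.length_append, List.length_take] at this
    omega
  rw [PySem.List.slice_to t hi, PySem.List.slice_from t (by omega)]
  rw [show (PySem.Chars.find t ['1', '1', '0'] + 3).toNat =
      (PySem.Chars.find t ['1', '1', '0']).toNat + 3 from by omega]
  simp [List.length_append, List.length_take, List.length_drop]
  omega

-- _norm: while i != -1: t = t[:i] + t[i+3:]; i = t.find('110')
def reduceB (t : List Char) : List Char :=
  let i := PySem.Chars.find t ['1', '1', '0']
  if h : i ≠ -1 then
    reduceB (PySem.List.slice t none (some i) ++ PySem.List.slice t (some (i + 3)) none)
  else t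
termination_by t.length
decreasing_by exact reduceB_dec t h

-- _fix: normal form, count by length conservation, rfind, splice
def fixB (string : String) : String :=
  let t := reduceB string.toList
  let count := PySem.Int.floordiv (PySem.Str.len string - (t.length : Int)) 3
  let p := PySem.Chars.rfind t ['0']
  String.ofList (PySem.List.slice t none (some (p + 1))
             ++ PySem.List.pyRepeat ['1', '1', '0'] count
             ++ PySem.List.slice t (some (p + 1)) none)

def solution_alt (s : List String) : List String := s.map fixB

-- ===== PRECONDITION & SPEC =====
def Spec_solution (s : List String) (out : List String) : Prop := out = solution_alt s
instance (s : List String) (out : List String) : Decidable (Spec_solution s out) := by unfold Spec_solution; infer_instance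

-- ===== CLAIM (what is proved, stated in full; the proofs are below) =====
def Claim_equal_solution : Prop := ∀ (s : List String), Dom_solution s → Spec_solution s (solution s)

-- ===== LEMMAS AND PROOFS =====

-- the last element survives dropping fewer than all elements
theorem getLast?_drop_of_lt (l : List Char) (k : Nat) (h : k < l.length) :
    (l.drop k).getLast? = l.getLast? := by
  induction l generalizing k with
  | nil => simp at h
  | cons a l ih =>
    cases k with
    | zero => simp
    | succ k =>
      simp only [List.drop_succ_cons]
      rw [ih k (by simpa using h)]
      cases l with
      | nil => simp at h
      | cons b l => simp

-- pushing a non-'0' char never triggers the pop branch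
theorem stepA_push (st : List Char) (c : Int) (e : Char) (he : e ≠ '0') :
    stepA (st, c) e = (st ++ [e], c) := by
  simp only [stepA]
  split_ifs with hcond
  · exfalso
    obtain ⟨hlen, hsl⟩ := hcond
    rw [PySem.List.slice_from_neg_ofNat _ 3 (by norm_num)] at hsl
    have hk : (st ++ [e]).length - 3 < (st ++ [e]).length := by
      simp only [List.length_append, List.length_singleton] at hlen ⊢; omega
    have hlast := congrArg List.getLast? hsl
    rw [getLast?_drop_of_lt _ _ hk] at hlast
    simp at hlast
    exact he hlast
  · rfl

-- processing the three chars '1','1','0' returns to the same stack and counts one removal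
theorem foldl_stepA_110 (st : List Char) (c : Int) :
    (['1', '1', '0'] : List Char).foldl stepA (st, c) = (st, c + 1) := by
  simp only [List.foldl_cons, List.foldl_nil]
  rw [stepA_push st c '1' (by decide), stepA_push _ c '1' (by decide)]
  have hs : st ++ ['1'] ++ ['1'] ++ ['0'] = st ++ ['1', '1', '0'] := by simp
  simp only [stepA]
  simp only [hs]
  rw [if_pos]
  · have h1 : (st ++ ['1', '1', '0']).dropLast = st ++ ['1', '1'] := by
      rw [show st ++ ['1', '1', '0'] = (st ++ ['1', '1']) ++ ['0'] by simp, List.dropLast_concat]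
    have h2 : (st ++ ['1', '1']).dropLast = st ++ ['1'] := by
      rw [show st ++ ['1', '1'] = (st ++ ['1']) ++ ['1'] by simp, List.dropLast_concat]
    rw [h1, h2, List.dropLast_concat]
  · constructor
    · simp only [List.length_append, List.length_cons, List.length_nil]; omega
    · rw [PySem.List.slice_from_neg_ofNat _ 3 (by norm_num)]
      rw [show (st ++ ['1', '1', '0']).length - 3 = st.length by simp]
      exact List.drop_left

-- stepA's count is a passive accumulator
theorem stepA_shift (st : List Char) (c d : Int) (e : Char) :
    stepA (st, c + d) e = ((stepA (st, c) e).1, (stepA (st, c) e).2 + d) := by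
  simp only [stepA]
  split_ifs <;> simp <;> ring

theorem foldl_stepA_shift (l : List Char) (st : List Char) (c d : Int) :
    l.foldl stepA (st, c + d) = ((l.foldl stepA (st, c)).1, (l.foldl stepA (st, c)).2 + d) := by
  induction l generalizing st c with
  | nil => simp
  | cons x xs ih =>
    simp only [List.foldl_cons]
    rw [stepA_shift]
    rcases hx : stepA (st, c) x with ⟨st', c'⟩
    simp only [hx]
    exact ih st' c'

-- deleting one '110' occurrence commutes with the stack run
theorem foldl_stepA_remove (u v : List Char) :
    (u ++ ['1', '1', '0'] ++ v).foldl stepA (([] : List Char), (0 : Int)) =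
      (((u ++ v).foldl stepA ([], 0)).1, ((u ++ v).foldl stepA ([], 0)).2 + 1) := by
  rw [List.foldl_append, List.foldl_append, List.foldl_append]
  rcases hu : u.foldl stepA (([] : List Char), (0 : Int)) with ⟨st1, c1⟩
  rw [foldl_stepA_110, foldl_stepA_shift]

-- a '110'-free string passes through the stack untouched
theorem foldl_stepA_no110 (t : List Char) (h : ¬ ['1', '1', '0'] <:+: t) :
    t.foldl stepA (([] : List Char), (0 : Int)) = (t, 0) := by
  induction t using List.reverseRecOn with
  | nil => simp
  | append_singleton xs a ih =>
    have hxs : ¬ ['1', '1', '0'] <:+: xs := fun hinf =>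
      h (hinf.trans (List.prefix_append xs [a]).isInfix)
    rw [List.foldl_append, ih hxs]
    simp only [List.foldl_cons, List.foldl_nil]
    simp only [stepA]
    split_ifs with hcond
    · exfalso
      obtain ⟨hlen, hsl⟩ := hcond
      rw [PySem.List.slice_from_neg_ofNat _ 3 (by norm_num)] at hsl
      exact h (List.IsSuffix.isInfix (hsl ▸ List.drop_suffix _ _))
    · rfl

-- the stack run computes reduceB's normal form, and the count is the length deficit over 3
theorem reduceB_spec_aux (n : Nat) :
    ∀ t : List Char, t.length ≤ n →
    ∃ k : Nat, t.foldl stepA (([] : List Char), (0 : Int)) = (reduceB t, (k : Int)) ∧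
      t.length = (reduceB t).length + 3 * k := by
  induction n with
  | zero =>
    intro t ht
    have ht0 : t = [] := by
      cases t with
      | nil => rfl
      | cons a l => simp at ht
    subst ht0
    refine ⟨0, ?_, ?_⟩
    · rw [reduceB]
      simp [show PySem.Chars.find [] ['1', '1', '0'] = -1 from by decide]
    · rw [reduceB]
      simp [show PySem.Chars.find [] ['1', '1', '0'] = -1 from by decide]
  | succ n ih =>
    intro t ht
    by_cases h : PySem.Chars.find t ['1', '1', '0'] = -1
    · have hni : ¬ ['1', '1', '0'] <:+: t := (PySem.Chars.find_eq_neg_one_iff t _).mp h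
      have hred : reduceB t = t := by rw [reduceB]; simp [h]
      exact ⟨0, by rw [foldl_stepA_no110 t hni, hred]; simp, by rw [hred]; simp⟩
    · have hi : 0 ≤ PySem.Chars.find t ['1', '1', '0'] :=
        (PySem.Chars.find_nonneg_iff t _).mpr ((PySem.Chars.find_ne_neg_one_iff t _).mp h)
      have hdec := find_decomp t h
      set u := t.take (PySem.Chars.find t ['1', '1', '0']).toNat with hu
      set v := t.drop ((PySem.Chars.find t ['1', '1', '0']).toNat + 3) with hv
      have hred : reduceB t = reduceB (u ++ v) := by
        rw [reduceB]
        simp only [h, dite_true, ne_eq, not_false_iff, dif_pos]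
        congr 1
        rw [PySem.List.slice_to t hi, PySem.List.slice_from t (by omega)]
        rw [show (PySem.Chars.find t ['1', '1', '0'] + 3).toNat =
            (PySem.Chars.find t ['1', '1', '0']).toNat + 3 from by omega]
      have hlen3 : t.length = (u ++ v).length + 3 := by
        conv_lhs => rw [hdec]
        simp [List.length_append]
        omega
      obtain ⟨k', h1, h2⟩ := ih (u ++ v) (by omega)
      refine ⟨k' + 1, ?_, ?_⟩
      · conv_lhs => rw [hdec]
        rw [foldl_stepA_remove, h1, hred]
        push_cast
        rfl
      · rw [hred]; omega

theorem reduceB_spec (t : List Char) :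
    ∃ k : Nat, t.foldl stepA (([] : List Char), (0 : Int)) = (reduceB t, (k : Int)) ∧
      t.length = (reduceB t).length + 3 * k :=
  reduceB_spec_aux t.length t le_rfl

-- ['0'] is a prefix of drop m iff the char at m is '0'
theorem isPrefixOf_drop_zero (st : List Char) (m : Nat) :
    (['0'].isPrefixOf (st.drop m)) = (st.getD m ' ' == '0') := by
  by_cases h : m < st.length
  · rw [List.drop_eq_getElem_cons h, List.getD_eq_getElem st ' ' h]
    simp [List.isPrefixOf, Bool.beq_comm]
  · rw [List.drop_eq_nil_of_le (by omega), List.getD_eq_default st ' ' (by omega)]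
    simp [List.isPrefixOf]

theorem findP_succ (st : List Char) (n : Nat) :
    findP st (n + 1) = if st.getD n ' ' = '0' then (n : Int) else findP st n := rfl

theorem rfind_go_eq_findP (st : List Char) (m : Nat) :
    PySem.Chars.rfind.go st ['0'] m = findP st (m + 1) := by
  induction m with
  | zero =>
    show (if ['0'].isPrefixOf st = true then (0 : Int) else -1) = findP st 1
    rw [show ['0'].isPrefixOf st = (st.getD 0 ' ' == '0') from by
      simpa using isPrefixOf_drop_zero st 0, findP_succ]
    by_cases hc : st.getD 0 ' ' = '0' <;> simp [hc, findP]
  | succ m ih =>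
    show (if ['0'].isPrefixOf (st.drop (m + 1)) = true then ((m + 1 : Nat) : Int)
        else PySem.Chars.rfind.go st ['0'] m) = findP st (m + 1 + 1)
    rw [isPrefixOf_drop_zero st (m + 1), findP_succ st (m + 1)]
    simp only [beq_iff_eq]
    split
    · rfl
    · exact ih

-- A's backwards scan is rfind('0')
theorem rfind_eq_findP (st : List Char) :
    PySem.Chars.rfind st ['0'] = findP st st.length := by
  show PySem.Chars.rfind.go st ['0'] st.length = _
  rw [rfind_go_eq_findP]
  rw [findP_succ, if_neg]
  rw [List.getD_eq_default st ' ' le_rfl]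
  decide

-- per-string agreement of the two loop bodies
theorem body_eq (string : String) :
    (let sc := string.toList.foldl stepA (([] : List Char), (0 : Int))
     let p := findP sc.1 sc.1.length
     String.ofList (PySem.List.slice sc.1 none (some (p + 1))
               ++ PySem.List.pyRepeat ['1', '1', '0'] sc.2
               ++ PySem.List.slice sc.1 (some (p + 1)) none)) = fixB string := by
  obtain ⟨k, h1, h2⟩ := reduceB_spec string.toList
  have hcount : PySem.Int.floordiv (PySem.Str.len string - ((reduceB string.toList).length : Int)) 3
      = (k : Int) := by
    have hlen : PySem.Str.len string - ((reduceB string.toList).length : Int) = 3 * k := by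
      unfold PySem.Str.len
      push_cast [h2]
      ring
    rw [hlen, PySem.Int.floordiv_eq_ediv_of_pos (by norm_num)]
    exact Int.mul_ediv_cancel_left _ (by norm_num)
  simp only [fixB, h1, ← hcount, rfind_eq_findP]

-- ===== VERDICT (by name: the statement is the Claim_ definition above) =====
theorem solution_spec : Claim_equal_solution := by
  intro s _
  unfold Spec_solution solution solution_alt
  rw [PySem.List.foldl_append_singleton_eq_map, List.nil_append]
  exact List.map_congr_left (fun x _ => body_eq x)
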